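-- pv_equiv track=rewrite | github.com/Daiwenxi798673133/dm_lab | task7_rule_based_qa/query_parser.py | _detect_visitor_type
-- ===== SOURCE A (Python) =====
-- from typing import Dict, List, Optional
--
-- def _detect_visitor_type(text: str, visitor_patterns: Dict[str, List[str]]) -> Optional[str]:
--     # 优先匹配family/elderly/couple等具体类型，不把general作为显式输出
--     ranked_types = [
--         "family",
--         "elderly",
--         "couple",
--         "solo",
--         "photographer",
--         "experienced",
--         "beginner",
--     ]
--
--     scores = {}
--     for vtype, keywords in visitor_patterns.items():
--         if vtype not in ranked_types:
--             continue
--         hit_count = sum(1 for kw in keywords if kw and kw in text)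
--         if hit_count > 0:
--             scores[vtype] = hit_count
--
--     if not scores:
--         return None
--
--     return max(
--         scores.items(),
--         key=lambda x: (x[1], -ranked_types.index(x[0]) if x[0] in ranked_types else -999),
--     )[0]
-- ===== SOURCE B (Python) =====
-- def _detect_visitor_type(text, visitor_patterns):
--     # Single guided pass over the fixed priority list: no scores dict, no max(), no .index().
--     ranked_types = [
--         "family",
--         "elderly",
--         "couple",
--         "solo",
--         "photographer",
--         "experienced",
--         "beginner",
--     ]
--     best = None
--     best_count = 0
--     for vtype in ranked_types:
--         keywords = visitor_patterns.get(vtype)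
--         if keywords is None:
--             continue
--         hit_count = sum(1 for kw in keywords if kw and kw in text)
--         if hit_count > best_count:
--             best = vtype
--             best_count = hit_count
--     return best
-- ===== Notes on version B (the rewrite author's own statement) =====
-- stated objective: simpler
-- what changed: Replaces A's scores-dict build over all dict items plus max() with a (count, -ranked_types.index) tuple key by a single pass over the fixed ranked_types priority list that keeps one best/best_count pair updated on strict >, which reproduces the count-then-priority tie-breaking and the None case directly.
import Mathlib
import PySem

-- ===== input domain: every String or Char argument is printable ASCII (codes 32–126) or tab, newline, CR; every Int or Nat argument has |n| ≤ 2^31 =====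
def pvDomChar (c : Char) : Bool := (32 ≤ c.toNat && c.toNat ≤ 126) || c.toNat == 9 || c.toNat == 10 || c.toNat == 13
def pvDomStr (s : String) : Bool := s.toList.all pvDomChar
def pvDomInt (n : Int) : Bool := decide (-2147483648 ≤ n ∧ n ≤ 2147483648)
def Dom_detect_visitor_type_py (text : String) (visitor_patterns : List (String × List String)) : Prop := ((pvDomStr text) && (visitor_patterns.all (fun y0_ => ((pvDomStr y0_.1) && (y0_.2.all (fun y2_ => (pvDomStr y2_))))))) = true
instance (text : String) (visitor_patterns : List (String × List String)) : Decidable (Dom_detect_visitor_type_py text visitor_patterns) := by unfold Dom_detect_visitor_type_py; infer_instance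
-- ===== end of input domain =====

-- B replaces A's scores-dict + max(key=(count, -index)) by one guided pass over the fixed
-- priority list with a single best/best_count pair (objective: simpler).

-- shared literal: the ranked_types list both Python versions write out
def pvRanked : List String :=
  ["family", "elderly", "couple", "solo", "photographer", "experienced", "beginner"]

-- sum(1 for kw in keywords if kw and kw in text)  (identical generator expression in A and B)
def pvHit (text : String) (keywords : List String) : Int :=
  ((keywords.filter (fun kw => !(kw == "") && PySem.Str.isIn kw text)).map (fun _ => (1 : Int))).sum

-- ===== PORT A =====
def detect_visitor_type_py (text : String) (visitor_patterns : List (String × List String)) : Option String :=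
  let d := PySem.Dict.ofList visitor_patterns
  let scores := d.items.foldl
    (fun (sc : PySem.Dict String Int) p =>
      if p.1 ∉ pvRanked then sc
      else
        let hit_count := pvHit text p.2
        if hit_count > 0 then sc.insert p.1 hit_count else sc)
    PySem.Dict.empty
  if scores.items.isEmpty then none
  else
    (PySem.List.max2? scores.items (fun x => x.2)
      (fun x => if x.1 ∈ pvRanked then -(((PySem.List.index? pvRanked x.1).getD 0 : Int)) else -999)).map
      Prod.fst

-- ===== PORT B =====
-- loop body of B: one step of the best/best_count scan
def pvStep (text : String) (d : PySem.Dict String (List String)) (st : Option String × Int)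
    (vtype : String) : Option String × Int :=
  match d.get? vtype with
  | none => st
  | some keywords =>
    let hit_count := pvHit text keywords
    if hit_count > st.2 then (some vtype, hit_count) else st

def detect_visitor_type_py_alt (text : String) (visitor_patterns : List (String × List String)) : Option String :=
  (pvRanked.foldl (pvStep text (PySem.Dict.ofList visitor_patterns)) (none, 0)).1

-- ===== PRECONDITION & SPEC =====
def Spec_detect_visitor_type_py (text : String) (visitor_patterns : List (String × List String)) (out : Option String) : Prop := out = detect_visitor_type_py_alt text visitor_patterns
instance (text : String) (visitor_patterns : List (String × List String)) (out : Option String) : Decidable (Spec_detect_visitor_type_py text visitor_patterns out) := by unfold Spec_detect_visitor_type_py; infer_instance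

-- ===== CLAIM (what is proved, stated in full; the proofs are below) =====
def Claim_equal_detect_visitor_type_py : Prop := ∀ (text : String) (visitor_patterns : List (String × List String)), Dom_detect_visitor_type_py text visitor_patterns → Spec_detect_visitor_type_py text visitor_patterns (detect_visitor_type_py text visitor_patterns)

-- ===== LEMMAS AND PROOFS =====

-- the hit count of a type through the dict (0 when absent)
def pvH (text : String) (d : PySem.Dict String (List String)) (t : String) : Int :=
  match d.get? t with
  | none => 0
  | some kws => pvHit text kws

-- priority rank of a type
def pvIdx (t : String) : Nat := (PySem.List.index? pvRanked t).getD 0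

-- the property characterising the answer: t has a positive hit count and every
-- type either scores strictly less or ties with lower priority
def pvGood (text : String) (d : PySem.Dict String (List String)) (t : String) : Prop :=
  t ∈ pvRanked ∧ 0 < pvH text d t ∧
    ∀ t' ∈ pvRanked, pvH text d t' < pvH text d t ∨
      (pvH text d t' = pvH text d t ∧ pvIdx t ≤ pvIdx t')

lemma pvHit_nonneg (text : String) (kws : List String) : 0 ≤ pvHit text kws := by
  unfold pvHit
  induction kws.filter (fun kw => !(kw == "") && PySem.Str.isIn kw text) with
  | nil => simp
  | cons a l ih => simp only [List.map_cons, List.sum_cons] at *; omega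

lemma pvH_nonneg (text : String) (d : PySem.Dict String (List String)) (t : String) :
    0 ≤ pvH text d t := by
  unfold pvH; cases d.get? t with
  | none => simp
  | some kws => exact pvHit_nonneg text kws

-- B-side fold lemmas
lemma pvStep_eq (text : String) (d : PySem.Dict String (List String))
    (st : Option String × Int) (v : String) (h0 : 0 ≤ st.2) :
    pvStep text d st v = if st.2 < pvH text d v then (some v, pvH text d v) else st := by
  unfold pvStep pvH
  cases hd : d.get? v with
  | none => simp; omega
  | some kws => simp [gt_iff_lt]

lemma pvFold_keep (text : String) (d : PySem.Dict String (List String)) (l : List String)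
    (st : Option String × Int) (hall : ∀ v ∈ l, pvH text d v ≤ st.2) :
    l.foldl (pvStep text d) st = st := by
  induction l with
  | nil => rfl
  | cons x xs ih =>
    have hx : pvH text d x ≤ st.2 := hall x (by simp)
    have hstep : pvStep text d st x = st := by
      unfold pvStep pvH at *
      cases hd : d.get? x with
      | none => rfl
      | some kws => simp [hd] at hx ⊢; omega
    rw [List.foldl_cons, hstep]
    exact ih (fun v hv => hall v (by simp [hv]))

lemma pvFold_bound (text : String) (d : PySem.Dict String (List String)) (l : List String)
    (c : Int) (hall : ∀ v ∈ l, pvH text d v < c) :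
    ∀ st : Option String × Int, 0 ≤ st.2 → st.2 < c →
      0 ≤ (l.foldl (pvStep text d) st).2 ∧ (l.foldl (pvStep text d) st).2 < c := by
  induction l with
  | nil => intro st h0 hc; exact ⟨h0, hc⟩
  | cons x xs ih =>
    intro st h0 hc
    rw [List.foldl_cons, pvStep_eq text d st x h0]
    have hx : pvH text d x < c := hall x (by simp)
    have hxs : ∀ v ∈ xs, pvH text d v < c := fun v hv => hall v (by simp [hv])
    by_cases h : st.2 < pvH text d x
    · simp only [if_pos h]
      exact ih hxs _ (pvH_nonneg text d x) hx
    · simp only [if_neg h]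
      exact ih hxs st h0 hc

-- running the B loop over a decomposed list whose middle element is the first argmax
lemma pvRun_one (text : String) (d : PySem.Dict String (List String))
    (R₁ R₂ : List String) (t : String)
    (h1 : ∀ v ∈ R₁, pvH text d v < pvH text d t)
    (ht : 0 < pvH text d t)
    (h2 : ∀ v ∈ R₂, pvH text d v ≤ pvH text d t) :
    ((R₁ ++ t :: R₂).foldl (pvStep text d) (none, 0)).1 = some t := by
  rw [List.foldl_append]
  obtain ⟨hr0, hrlt⟩ := pvFold_bound text d R₁ (pvH text d t) h1 (none, 0) le_rfl ht
  set r := R₁.foldl (pvStep text d) (none, 0) with hr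
  rw [List.foldl_cons, pvStep_eq text d r t hr0, if_pos hrlt]
  rw [pvFold_keep text d R₂ (some t, pvH text d t) (by simpa using h2)]

-- B returns the good element
lemma pvB_good (text : String) (d : PySem.Dict String (List String)) (t : String)
    (hg : pvGood text d t) :
    (pvRanked.foldl (pvStep text d) (none, 0)).1 = some t := by
  obtain ⟨hmem, hpos, hall⟩ := hg
  have hcase : t = "family" ∨ t = "elderly" ∨ t = "couple" ∨ t = "solo" ∨
      t = "photographer" ∨ t = "experienced" ∨ t = "beginner" := by
    simpa [pvRanked] using hmem
  have hlt : ∀ t' ∈ pvRanked, pvIdx t' < pvIdx t → pvH text d t' < pvH text d t := by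
    intro t' hmem' hidx
    rcases hall t' hmem' with h | ⟨_, hle⟩
    · exact h
    · omega
  have hle : ∀ t' ∈ pvRanked, pvH text d t' ≤ pvH text d t := by
    intro t' hmem'
    rcases hall t' hmem' with h | ⟨h, _⟩ <;> omega
  rcases hcase with rfl | rfl | rfl | rfl | rfl | rfl | rfl
  · exact pvRun_one text d [] _ _ (by simp) hpos
      (fun v hv => hle v (by simp [pvRanked]; simp at hv; tauto))
  · exact pvRun_one text d ["family"] _ _
      (fun v hv => hlt v (by simp [pvRanked] at hv ⊢; tauto) (by simp at hv; subst hv; decide))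
      hpos (fun v hv => hle v (by simp [pvRanked] at hv ⊢; tauto))
  · exact pvRun_one text d ["family", "elderly"] _ _
      (fun v hv => hlt v (by simp [pvRanked] at hv ⊢; tauto)
        (by simp at hv; rcases hv with rfl | rfl <;> decide))
      hpos (fun v hv => hle v (by simp [pvRanked] at hv ⊢; tauto))
  · exact pvRun_one text d ["family", "elderly", "couple"] _ _
      (fun v hv => hlt v (by simp [pvRanked] at hv ⊢; tauto)
        (by simp at hv; rcases hv with rfl | rfl | rfl <;> decide))
      hpos (fun v hv => hle v (by simp [pvRanked] at hv ⊢; tauto))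
  · exact pvRun_one text d ["family", "elderly", "couple", "solo"] _ _
      (fun v hv => hlt v (by simp [pvRanked] at hv ⊢; tauto)
        (by simp at hv; rcases hv with rfl | rfl | rfl | rfl <;> decide))
      hpos (fun v hv => hle v (by simp [pvRanked] at hv ⊢; tauto))
  · exact pvRun_one text d ["family", "elderly", "couple", "solo", "photographer"] _ _
      (fun v hv => hlt v (by simp [pvRanked] at hv ⊢; tauto)
        (by simp at hv; rcases hv with rfl | rfl | rfl | rfl | rfl <;> decide))
      hpos (fun v hv => hle v (by simp [pvRanked] at hv ⊢; tauto))
  · exact pvRun_one text d ["family", "elderly", "couple", "solo", "photographer", "experienced"] _ _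
      (fun v hv => hlt v (by simp [pvRanked] at hv ⊢; tauto)
        (by simp at hv; rcases hv with rfl | rfl | rfl | rfl | rfl | rfl <;> decide))
      hpos (by simp)

-- A-side: the scores dict's items list
def pvSItems (text : String) (visitor_patterns : List (String × List String)) : List (String × Int) :=
  (((PySem.Dict.ofList visitor_patterns).items.filter
      (fun p => decide (p.1 ∈ pvRanked ∧ 0 < pvHit text p.2))).map
    (fun p => (p.1, pvHit text p.2)))

lemma pvScores_eq (text : String) (visitor_patterns : List (String × List String)) :
    ((PySem.Dict.ofList visitor_patterns).items.foldl
      (fun (sc : PySem.Dict String Int) p =>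
        if p.1 ∉ pvRanked then sc
        else
          let hit_count := pvHit text p.2
          if hit_count > 0 then sc.insert p.1 hit_count else sc)
      PySem.Dict.empty).items = pvSItems text visitor_patterns := by
  rw [PySem.List.foldl_congr_mem _ _
      (fun (sc : PySem.Dict String Int) p =>
        if p.1 ∈ pvRanked ∧ 0 < pvHit text p.2 then sc.insert p.1 (pvHit text p.2) else sc)
      _
      (by
        intro acc p _
        by_cases h1 : p.1 ∈ pvRanked <;> by_cases h2 : (0 : Int) < pvHit text p.2 <;>
          simp [h1, h2, gt_iff_lt])]
  rw [PySem.List.foldl_ite_eq_foldl_filter]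
  have hnodup : (((PySem.Dict.ofList visitor_patterns).items.filter
      (fun p => decide (p.1 ∈ pvRanked ∧ 0 < pvHit text p.2))).map
        (fun p : String × List String => p.1)).Nodup := by
    have hk : ((PySem.Dict.ofList visitor_patterns).items.map
        (fun p : String × List String => p.1)).Nodup := by
      have := PySem.Dict.nodup_keys_ofList visitor_patterns (ν := List String)
      simpa [PySem.Dict.keys] using this
    exact hk.sublist (List.Sublist.map _ List.filter_sublist)
  rw [PySem.Dict.items_foldl_insert_fresh _
      (fun p : String × List String => p.1) (fun p => pvHit text p.2) _
      (by intro a _; exact PySem.Dict.contains_empty _)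
      hnodup]
  simp [pvSItems, PySem.Dict.empty]

lemma pvMem_sItems (text : String) (visitor_patterns : List (String × List String))
    (t : String) (c : Int) :
    (t, c) ∈ pvSItems text visitor_patterns ↔
      t ∈ pvRanked ∧ 0 < pvH text (PySem.Dict.ofList visitor_patterns) t ∧
        c = pvH text (PySem.Dict.ofList visitor_patterns) t := by
  have hnd : (PySem.Dict.ofList visitor_patterns).keys.Nodup :=
    PySem.Dict.nodup_keys_ofList visitor_patterns
  constructor
  · intro h
    simp only [pvSItems, List.mem_map] at h
    obtain ⟨p, hp, heq⟩ := h
    rw [List.mem_filter] at hp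
    obtain ⟨hpd, hq⟩ := hp
    simp only [decide_eq_true_eq] at hq
    obtain ⟨h1, h2⟩ := hq
    rw [Prod.ext_iff] at heq
    obtain ⟨ht, hc⟩ := heq
    dsimp at ht hc
    subst ht
    have hget : (PySem.Dict.ofList visitor_patterns).get? p.1 = some p.2 :=
      PySem.Dict.get?_of_mem_items _ (by simpa using hpd) hnd
    have hH : pvH text (PySem.Dict.ofList visitor_patterns) p.1 = pvHit text p.2 := by
      unfold pvH; rw [hget]
    exact ⟨h1, by omega, by omega⟩
  · rintro ⟨h1, h2, rfl⟩
    obtain ⟨kws, hget⟩ : ∃ kws, (PySem.Dict.ofList visitor_patterns).get? t = some kws := by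
      unfold pvH at h2
      cases hg : (PySem.Dict.ofList visitor_patterns).get? t with
      | none => rw [hg] at h2; simp at h2
      | some kws => exact ⟨kws, rfl⟩
    have hmemi : (t, kws) ∈ (PySem.Dict.ofList visitor_patterns).items :=
      PySem.Dict.mem_items_of_get?_eq_some _ hget
    have hH : pvH text (PySem.Dict.ofList visitor_patterns) t = pvHit text kws := by
      unfold pvH; rw [hget]
    simp only [pvSItems, List.mem_map]
    refine ⟨(t, kws), ?_, by simp [hH]⟩
    rw [List.mem_filter]
    exact ⟨hmemi, by simp only [decide_eq_true_eq]; exact ⟨h1, by rw [← hH]; exact h2⟩⟩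

-- first lexicographic argmax of max2? with Int keys
lemma pvMax2_aux {α : Type} (k1 k2 : α → Int) (xs : List α) :
    ∀ m₀ : α, ∃ mf, xs.foldl
      (fun acc x =>
        match acc with
        | none => some x
        | some m =>
          if (decide (k1 m < k1 x) || !decide (k1 x < k1 m) && decide (k2 m < k2 x)) = true
          then some x else some m)
      (some m₀) = some mf ∧ (mf = m₀ ∨ mf ∈ xs) ∧
      (k1 m₀ < k1 mf ∨ (k1 m₀ = k1 mf ∧ k2 m₀ ≤ k2 mf)) ∧
      ∀ y ∈ xs, k1 y < k1 mf ∨ (k1 y = k1 mf ∧ k2 y ≤ k2 mf) := by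
  induction xs with
  | nil => intro m₀; exact ⟨m₀, rfl, Or.inl rfl, Or.inr ⟨rfl, le_rfl⟩, by simp⟩
  | cons x xs ih =>
    intro m₀
    rw [List.foldl_cons]
    by_cases hc : (decide (k1 m₀ < k1 x) || !decide (k1 x < k1 m₀) && decide (k2 m₀ < k2 x)) = true
    · simp only [hc, if_pos]
      obtain ⟨mf, heq, hmem, hle, hall⟩ := ih x
      simp only [Bool.or_eq_true, Bool.and_eq_true, Bool.not_eq_true', decide_eq_true_eq,
        decide_eq_false_iff_not] at hc
      have hmem' : mf = m₀ ∨ mf ∈ x :: xs := by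
        rcases hmem with rfl | h
        · exact Or.inr List.mem_cons_self
        · exact Or.inr (List.mem_cons_of_mem _ h)
      refine ⟨mf, heq, hmem', ?_, ?_⟩
      · rcases hc with h | ⟨h1, h2⟩ <;> rcases hle with h' | ⟨h1', h2'⟩ <;> omega
      · intro y hy
        rcases List.mem_cons.mp hy with rfl | hy
        · exact hle
        · exact hall y hy
    · rw [Bool.not_eq_true] at hc
      simp only [hc, Bool.false_eq_true, if_false]
      obtain ⟨mf, heq, hmem, hle, hall⟩ := ih m₀
      simp at hc
      have hmem' : mf = m₀ ∨ mf ∈ x :: xs := by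
        rcases hmem with rfl | h
        · exact Or.inl rfl
        · exact Or.inr (List.mem_cons_of_mem _ h)
      refine ⟨mf, heq, hmem', hle, ?_⟩
      intro y hy
      rcases List.mem_cons.mp hy with rfl | hy
      · obtain ⟨hc1, hc2⟩ := hc
        rcases hle with h' | ⟨h1', h2'⟩ <;> omega
      · exact hall y hy

lemma pvMax2_spec {α : Type} (k1 k2 : α → Int) (x : α) (xs : List α) :
    ∃ m, PySem.List.max2? (x :: xs) k1 k2 = some m ∧ m ∈ x :: xs ∧
      ∀ y ∈ x :: xs, k1 y < k1 m ∨ (k1 y = k1 m ∧ k2 y ≤ k2 m) := by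
  obtain ⟨mf, heq, hmem, hle, hall⟩ := pvMax2_aux k1 k2 xs x
  refine ⟨mf, ?_, by rcases hmem with rfl | h; exact .head _; exact .tail _ h, ?_⟩
  · simpa [PySem.List.max2?] using heq
  · intro y hy
    rcases List.mem_cons.mp hy with rfl | hy
    · exact hle
    · exact hall y hy

-- ===== VERDICT (by name: the statement is the Claim_ definition above) =====
theorem detect_visitor_type_py_spec : Claim_equal_detect_visitor_type_py := by
  intro text vp _
  unfold Spec_detect_visitor_type_py detect_visitor_type_py detect_visitor_type_py_alt
  simp only [pvScores_eq]
  cases hS : pvSItems text vp with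
  | nil =>
    have hzero : ∀ v ∈ pvRanked, pvH text (PySem.Dict.ofList vp) v ≤ 0 := by
      intro v hv
      by_contra h
      push Not at h
      have : (v, pvH text (PySem.Dict.ofList vp) v) ∈ pvSItems text vp :=
        (pvMem_sItems text vp v _).mpr ⟨hv, h, rfl⟩
      rw [hS] at this
      simp at this
    rw [pvFold_keep text (PySem.Dict.ofList vp) pvRanked (none, 0) hzero]
    simp
  | cons x xs =>
    obtain ⟨m, hmax, hmemm, hall⟩ := pvMax2_spec (fun x : String × Int => x.2)
      (fun x : String × Int =>
        if x.1 ∈ pvRanked then -(((PySem.List.index? pvRanked x.1).getD 0 : Int)) else -999) x xs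
    rw [hmax]
    have hmS : (m.1, m.2) ∈ pvSItems text vp := by rw [hS]; simpa using hmemm
    obtain ⟨hm1, hm2, hm3⟩ := (pvMem_sItems text vp m.1 m.2).mp hmS
    have hgood : pvGood text (PySem.Dict.ofList vp) m.1 := by
      refine ⟨hm1, hm2, ?_⟩
      intro t' ht'
      by_cases hpos : 0 < pvH text (PySem.Dict.ofList vp) t'
      · have htS : (t', pvH text (PySem.Dict.ofList vp) t') ∈ x :: xs := by
          rw [← hS]; exact (pvMem_sItems text vp t' _).mpr ⟨ht', hpos, rfl⟩
        rcases hall _ htS with hlt | ⟨heq, hle⟩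
        · left; simp only at hlt; omega
        · right
          simp only at heq hle
          rw [if_pos ht', if_pos hm1] at hle
          refine ⟨by omega, ?_⟩
          unfold pvIdx
          omega
      · left
        have := pvH_nonneg text (PySem.Dict.ofList vp) t'
        omega
    rw [pvB_good text (PySem.Dict.ofList vp) m.1 hgood]
    simp
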